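-- pv_equiv track=rewrite | github.com/ahadjawaid/grokking-coding-interview | islands/number_of_distinct_islands.py | getIslandPattern
-- ===== SOURCE A (Python) =====
-- def getIslandPattern(matrix, visited, i, j, move):
--     if i not in range(len(matrix)) or j not in range(len(matrix[0])):
--         return ''
--
--     if matrix[i][j] == 0 or (i, j) in visited:
--         return ''
--
--     visited.add((i, j))
--
--     pattern = move
--     for i, j, move in [(i+1, j, 'U'), (i, j+1, 'R'), (i-1, j, 'D'), (i, j-1, 'L')]:
--         pattern += getIslandPattern(matrix, visited, i, j, move)
--
--     pattern += 'B'
--     return pattern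
-- ===== SOURCE B (Python) =====
-- def getIslandPattern(matrix, visited, i, j, move):
--     # Iterative DFS with an explicit stack of frames; a None frame marks a
--     # backtrack point ('B').  Mutates `visited` exactly like the recursive
--     # version; returns the same signature string.
--     rows = len(matrix)
--     cols = len(matrix[0]) if matrix else 0
--     out = ''
--     stack = [(i, j, move)]
--     while stack:
--         frame = stack.pop()
--         if frame is None:
--             out += 'B'
--             continue
--         i, j, move = frame
--         if not (0 <= i < rows and 0 <= j < cols):
--             continue
--         if matrix[i][j] == 0 or (i, j) in visited:
--             continue
--         visited.add((i, j))
--         out += move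
--         stack.append(None)
--         stack.extend([(i, j - 1, 'L'), (i - 1, j, 'D'), (i, j + 1, 'R'), (i + 1, j, 'U')])
--     return out
-- ===== Notes on version B (the rewrite author's own statement) =====
-- stated objective: alternative
-- what changed: The recursive DFS is replaced by an iterative traversal with an explicit stack of frames, using a None sentinel frame to emit the backtrack marker 'B', accumulating the signature string in a loop instead of by recursive concatenation.
-- outside the precondition, e.g. on getIslandPattern([[1, 0], [0], [0, 1]], set(), 0, 0, 'M'): A returns 'MB', B returns 'MB'
import Mathlib
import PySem

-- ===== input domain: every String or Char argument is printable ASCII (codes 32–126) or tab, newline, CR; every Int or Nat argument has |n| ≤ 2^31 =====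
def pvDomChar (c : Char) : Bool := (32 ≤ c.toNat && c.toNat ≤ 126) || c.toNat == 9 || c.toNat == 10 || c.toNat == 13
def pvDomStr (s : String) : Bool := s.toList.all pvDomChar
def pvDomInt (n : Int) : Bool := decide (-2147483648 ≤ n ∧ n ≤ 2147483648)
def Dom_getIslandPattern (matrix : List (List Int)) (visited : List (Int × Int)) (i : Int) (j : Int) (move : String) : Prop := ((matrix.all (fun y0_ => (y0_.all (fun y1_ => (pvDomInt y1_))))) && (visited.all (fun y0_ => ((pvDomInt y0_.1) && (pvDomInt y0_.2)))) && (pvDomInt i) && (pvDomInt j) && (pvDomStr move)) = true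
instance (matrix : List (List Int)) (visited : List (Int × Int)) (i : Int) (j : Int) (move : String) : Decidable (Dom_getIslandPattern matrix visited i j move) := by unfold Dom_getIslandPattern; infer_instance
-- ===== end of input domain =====

-- B replaces the recursive DFS by an iterative traversal with an explicit stack of
-- frames (a `none` frame emits the backtrack marker 'B'); alternative decomposition,
-- not claimed faster.  Both A and B mutate the caller's `visited` set in place
-- (identically); the equivalence proved here is about the RETURN value (the ports
-- thread `visited` as state).

-- ===== PORT A =====
-- matrix[i][j]; both programs access it only after their bounds checks, and it is
-- exact under Pre_ (rectangular rows), where every checked access is in range.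
def cellAt (matrix : List (List Int)) (i j : Int) : Int :=
  (PySem.List.pyGet? ((PySem.List.pyGet? matrix i).getD []) j).getD 0

-- all in-bounds grid positions (used only for the fuel bound / termination measure)
def pvCells (matrix : List (List Int)) : List (Int × Int) :=
  (List.range matrix.length).flatMap
    (fun r : Nat => (List.range (matrix.headD []).length).map
      (fun c : Nat => ((r : Int), (c : Int))))

-- grid cells not yet visited: the recursion/loop measure
def pvUnvisited (matrix : List (List Int)) (v : List (Int × Int)) : Nat :=
  ((pvCells matrix).filter (fun p => decide (p ∉ v))).length

-- A's recursive DFS, visited threaded as state.  `fuel` is only a totality guard: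
-- each recursion level first adds a fresh grid cell to visited, so the depth is
-- bounded by the number of grid cells and the top-level fuel below is never exhausted.
def goA (matrix : List (List Int)) :
    Nat → List (Int × Int) → Int → Int → String → String × List (Int × Int)
  | 0, visited, _, _, _ => ("", visited)
  | fuel + 1, visited, i, j, move =>
    if ¬ (0 ≤ i ∧ i < (matrix.length : Int)) ∨
       ¬ (0 ≤ j ∧ j < ((matrix.headD []).length : Int)) then ("", visited)
    else if cellAt matrix i j = 0 ∨ (i, j) ∈ visited then ("", visited)
    else
      let r1 := goA matrix fuel (PySem.Set.add visited (i, j)) (i + 1) j "U"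
      let r2 := goA matrix fuel r1.2 i (j + 1) "R"
      let r3 := goA matrix fuel r2.2 (i - 1) j "D"
      let r4 := goA matrix fuel r3.2 i (j - 1) "L"
      (move ++ r1.1 ++ r2.1 ++ r3.1 ++ r4.1 ++ "B", r4.2)

def getIslandPattern (matrix : List (List Int)) (visited : List (Int × Int)) (i : Int) (j : Int) (move : String) : String :=
  (goA matrix ((pvCells matrix).length + 1) visited i j move).1

-- ===== PORT B =====
-- two lemmas cited by loopB's decreasing_by (termination only)
theorem pv_mem_pvCells (matrix : List (List Int)) {i j : Int}
    (h1 : 0 ≤ i) (h2 : i < (matrix.length : Int))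
    (h3 : 0 ≤ j) (h4 : j < ((matrix.headD []).length : Int)) :
    (i, j) ∈ pvCells matrix := by
  have hi : i.toNat < matrix.length := by omega
  have hj : j.toNat < (matrix.headD []).length := by omega
  have hkey : (((i.toNat : Nat) : Int), ((j.toNat : Nat) : Int)) ∈ pvCells matrix := by
    unfold pvCells
    exact List.mem_flatMap.mpr ⟨i.toNat, List.mem_range.mpr hi,
      List.mem_map_of_mem (List.mem_range.mpr hj)⟩
  have hij : (((i.toNat : Nat) : Int), ((j.toNat : Nat) : Int)) = (i, j) := by
    simp [Int.toNat_of_nonneg h1, Int.toNat_of_nonneg h3]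
  rwa [hij] at hkey

theorem pv_unvisited_add_lt (matrix : List (List Int)) {v : List (Int × Int)} {i j : Int}
    (h1 : 0 ≤ i) (h2 : i < (matrix.length : Int))
    (h3 : 0 ≤ j) (h4 : j < ((matrix.headD []).length : Int))
    (hpv : (i, j) ∉ v) :
    pvUnvisited matrix (PySem.Set.add v (i, j)) < pvUnvisited matrix v := by
  unfold pvUnvisited
  rw [PySem.Set.add_of_not_mem hpv]
  have hEq : (pvCells matrix).filter (fun q => decide (q ∉ v ++ [(i, j)]))
      = ((pvCells matrix).filter (fun q => decide (q ∉ v))).filter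
          (fun q => decide (q ≠ (i, j))) := by
    rw [List.filter_filter]
    refine List.filter_congr ?_
    intro x _
    by_cases hx1 : x ∈ v <;> by_cases hx2 : x = (i, j) <;> simp [hx1, hx2]
  rw [hEq]
  exact List.length_filter_lt_length_iff_exists.mpr
    ⟨(i, j), by simp [pv_mem_pvCells matrix h1 h2 h3 h4, hpv], by simp⟩

-- B's loop: explicit stack of frames, `none` = backtrack sentinel emitting 'B'
def loopB (matrix : List (List Int)) (visited : List (Int × Int))
    (stack : List (Option (Int × Int × String))) (out : String) : String :=
  match stack with
  | [] => out
  | none :: rest => loopB matrix visited rest (out ++ "B")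
  | some (i, j, move) :: rest =>
    if h1 : ¬ (0 ≤ i ∧ i < (matrix.length : Int) ∧
               0 ≤ j ∧ j < ((matrix.headD []).length : Int)) then
      loopB matrix visited rest out
    else if h2 : cellAt matrix i j = 0 ∨ (i, j) ∈ visited then
      loopB matrix visited rest out
    else
      loopB matrix (PySem.Set.add visited (i, j))
        (some (i + 1, j, "U") :: some (i, j + 1, "R") :: some (i - 1, j, "D") ::
          some (i, j - 1, "L") :: none :: rest)
        (out ++ move)
  termination_by 5 * pvUnvisited matrix visited + stack.length
  decreasing_by
  all_goals simp
  all_goals try omega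
  push Not at h1 h2
  have := pv_unvisited_add_lt matrix h1.1 h1.2.1 h1.2.2.1 h1.2.2.2 h2.2
  omega

def getIslandPattern_alt (matrix : List (List Int)) (visited : List (Int × Int)) (i : Int) (j : Int) (move : String) : String :=
  loopB matrix visited [some (i, j, move)] ""

-- ===== PRECONDITION & SPEC =====
-- true iff position (r, c) exists in the matrix and holds a nonzero (land) value
def pvLand (matrix : List (List Int)) (r c : Int) : Bool :=
  decide (0 ≤ r) && decide (0 ≤ c) &&
    (match (PySem.List.pyGet? matrix r).bind (fun row => PySem.List.pyGet? row c) with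
     | some v => decide (v ≠ 0)
     | none => false)

-- A raises IndexError only by reading a "hole" of a ragged matrix (a position with
-- column < len(matrix[0]) but missing from its shorter row), reached as the start or
-- as a neighbour of a visited land cell.  Pre_ admits every input whose start frame
-- returns '' at once, and otherwise every input none of whose holes is the start or
-- adjacent to a land cell — a closed-form superset of the raising inputs is excluded
-- (see claim.json cites for an excluded input A returns on).
def Pre_getIslandPattern (matrix : List (List Int)) (visited : List (Int × Int)) (i : Int) (j : Int) (move : String) : Prop :=
  (¬ (0 ≤ i ∧ i < (matrix.length : Int) ∧ 0 ≤ j ∧ j < ((matrix.headD []).length : Int))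
    ∨ (j < ((matrix.getD i.toNat []).length : Int) ∧ (cellAt matrix i j = 0 ∨ (i, j) ∈ visited)))
  ∨ (∀ r ∈ List.range matrix.length, ∀ c ∈ List.range (matrix.headD []).length,
      (matrix.getD r []).length ≤ c →
        ((r : Int), (c : Int)) ≠ (i, j) ∧
        pvLand matrix ((r : Int) + 1) (c : Int) = false ∧
        pvLand matrix ((r : Int) - 1) (c : Int) = false ∧
        pvLand matrix (r : Int) ((c : Int) + 1) = false ∧
        pvLand matrix (r : Int) ((c : Int) - 1) = false)
instance (matrix : List (List Int)) (visited : List (Int × Int)) (i : Int) (j : Int) (move : String) : Decidable (Pre_getIslandPattern matrix visited i j move) := by unfold Pre_getIslandPattern; infer_instance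

def pvWitness_getIslandPattern : List (List Int) × (List (Int × Int)) × Int × Int × String :=
  ([[1, 1], [0, 1]], [], 0, 0, "M")

def Spec_getIslandPattern (matrix : List (List Int)) (visited : List (Int × Int)) (i : Int) (j : Int) (move : String) (out : String) : Prop := out = getIslandPattern_alt matrix visited i j move
instance (matrix : List (List Int)) (visited : List (Int × Int)) (i : Int) (j : Int) (move : String) (out : String) : Decidable (Spec_getIslandPattern matrix visited i j move out) := by unfold Spec_getIslandPattern; infer_instance

-- ===== CLAIM (what is proved, stated in full; the proofs are below) =====
def Claim_equal_getIslandPattern : Prop := ∀ (matrix : List (List Int)) (visited : List (Int × Int)) (i : Int) (j : Int) (move : String), Dom_getIslandPattern matrix visited i j move → Pre_getIslandPattern matrix visited i j move → Spec_getIslandPattern matrix visited i j move (getIslandPattern matrix visited i j move)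

-- ===== LEMMAS AND PROOFS =====

-- unfolding equations for loopB
theorem loopB_nil (matrix : List (List Int)) (v : List (Int × Int)) (out : String) :
    loopB matrix v [] out = out := by rw [loopB]

theorem loopB_none (matrix : List (List Int)) (v : List (Int × Int))
    (rest : List (Option (Int × Int × String))) (out : String) :
    loopB matrix v (none :: rest) out = loopB matrix v rest (out ++ "B") := by rw [loopB]

theorem loopB_skip (matrix : List (List Int)) (v : List (Int × Int)) (i j : Int)
    (move : String) (rest : List (Option (Int × Int × String))) (out : String)
    (h : ¬ (0 ≤ i ∧ i < (matrix.length : Int) ∧ 0 ≤ j ∧ j < ((matrix.headD []).length : Int))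
         ∨ cellAt matrix i j = 0 ∨ (i, j) ∈ v) :
    loopB matrix v (some (i, j, move) :: rest) out = loopB matrix v rest out := by
  rw [loopB]
  rcases h with h | h
  · rw [dif_pos h]
  · by_cases h1 : ¬ (0 ≤ i ∧ i < (matrix.length : Int) ∧ 0 ≤ j ∧ j < ((matrix.headD []).length : Int))
    · rw [dif_pos h1]
    · rw [dif_neg h1, dif_pos h]

theorem loopB_go (matrix : List (List Int)) (v : List (Int × Int)) (i j : Int)
    (move : String) (rest : List (Option (Int × Int × String))) (out : String)
    (h1 : 0 ≤ i ∧ i < (matrix.length : Int) ∧ 0 ≤ j ∧ j < ((matrix.headD []).length : Int))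
    (h2 : ¬ (cellAt matrix i j = 0 ∨ (i, j) ∈ v)) :
    loopB matrix v (some (i, j, move) :: rest) out =
      loopB matrix (PySem.Set.add v (i, j))
        (some (i + 1, j, "U") :: some (i, j + 1, "R") :: some (i - 1, j, "D") ::
          some (i, j - 1, "L") :: none :: rest) (out ++ move) := by
  rw [loopB, dif_neg (by tauto), dif_neg h2]

-- A's DFS only ever adds to visited
theorem goA_mono (matrix : List (List Int)) :
    ∀ (fuel : Nat) (v : List (Int × Int)) (i j : Int) (move : String) (q : Int × Int),
    q ∈ v → q ∈ (goA matrix fuel v i j move).2 := by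
  intro fuel
  induction fuel with
  | zero => intro v i j move q h; simpa [goA] using h
  | succ f ih =>
    intro v i j move q h
    rw [goA]
    split
    · exact h
    · split
      · exact h
      · exact ih _ _ _ _ _ (ih _ _ _ _ _ (ih _ _ _ _ _ (ih _ _ _ _ _
          ((PySem.Set.mem_add _ _ _).mpr (Or.inl h)))))

theorem pv_unvisited_mono (matrix : List (List Int)) {v w : List (Int × Int)}
    (h : ∀ q, q ∈ v → q ∈ w) : pvUnvisited matrix w ≤ pvUnvisited matrix v := by
  unfold pvUnvisited
  exact (List.monotone_filter_right (pvCells matrix)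
    (fun a ha => by simp_all only [decide_eq_true_eq]; exact fun hv => ha (h a hv))).length_le

theorem pv_unvisited_goA_le (matrix : List (List Int)) (fuel : Nat)
    (v : List (Int × Int)) (i j : Int) (move : String) :
    pvUnvisited matrix (goA matrix fuel v i j move).2 ≤ pvUnvisited matrix v :=
  pv_unvisited_mono matrix (fun q hq => goA_mono matrix fuel v i j move q hq)

-- the bridge: running B's loop on a cell frame equals splicing in A's recursive call
theorem pv_bridge (matrix : List (List Int)) :
    ∀ (fuel : Nat) (v : List (Int × Int)) (i j : Int) (move : String)
      (stack : List (Option (Int × Int × String))) (out : String),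
      pvUnvisited matrix v < fuel →
      loopB matrix v (some (i, j, move) :: stack) out =
        loopB matrix (goA matrix fuel v i j move).2 stack
          (out ++ (goA matrix fuel v i j move).1) := by
  intro fuel
  induction fuel with
  | zero => intro v i j move stack out h; omega
  | succ f ih =>
    intro v i j move stack out h
    by_cases h1 : 0 ≤ i ∧ i < (matrix.length : Int) ∧
                  0 ≤ j ∧ j < ((matrix.headD []).length : Int)
    · by_cases h2 : cellAt matrix i j = 0 ∨ (i, j) ∈ v
      · have hA : goA matrix (f + 1) v i j move = ("", v) := by
          rw [goA, if_neg (by tauto), if_pos h2]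
        rw [hA, loopB_skip matrix v i j move stack out (Or.inr h2), String.append_empty]
      · -- the recursive case
        push_neg at h2
        have hμ0 : pvUnvisited matrix (PySem.Set.add v (i, j)) < f := by
          have := pv_unvisited_add_lt matrix h1.1 h1.2.1 h1.2.2.1 h1.2.2.2 h2.2
          omega
        have hμ1 := pv_unvisited_goA_le matrix f (PySem.Set.add v (i, j)) (i + 1) j "U"
        have hμ2 := pv_unvisited_goA_le matrix f
          (goA matrix f (PySem.Set.add v (i, j)) (i + 1) j "U").2 i (j + 1) "R"
        have hμ3 := pv_unvisited_goA_le matrix f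
          (goA matrix f (goA matrix f (PySem.Set.add v (i, j)) (i + 1) j "U").2 i (j + 1) "R").2
          (i - 1) j "D"
        have hA : goA matrix (f + 1) v i j move =
            (move ++ (goA matrix f (PySem.Set.add v (i, j)) (i + 1) j "U").1
                  ++ (goA matrix f (goA matrix f (PySem.Set.add v (i, j)) (i + 1) j "U").2
                        i (j + 1) "R").1
                  ++ (goA matrix f (goA matrix f (goA matrix f (PySem.Set.add v (i, j))
                        (i + 1) j "U").2 i (j + 1) "R").2 (i - 1) j "D").1
                  ++ (goA matrix f (goA matrix f (goA matrix f (goA matrix f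
                        (PySem.Set.add v (i, j)) (i + 1) j "U").2 i (j + 1) "R").2
                        (i - 1) j "D").2 i (j - 1) "L").1 ++ "B",
             (goA matrix f (goA matrix f (goA matrix f (goA matrix f
                (PySem.Set.add v (i, j)) (i + 1) j "U").2 i (j + 1) "R").2
                (i - 1) j "D").2 i (j - 1) "L").2) := by
          rw [goA, if_neg (by tauto), if_neg (by tauto)]
        rw [loopB_go matrix v i j move stack out h1 (by tauto)]
        rw [ih _ _ _ _ _ _ hμ0]
        rw [ih _ _ _ _ _ _ (by omega : pvUnvisited matrix
          (goA matrix f (PySem.Set.add v (i, j)) (i + 1) j "U").2 < f)]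
        rw [ih _ _ _ _ _ _ (by omega : pvUnvisited matrix
          (goA matrix f (goA matrix f (PySem.Set.add v (i, j)) (i + 1) j "U").2
            i (j + 1) "R").2 < f)]
        rw [ih _ _ _ _ _ _ (by omega : pvUnvisited matrix
          (goA matrix f (goA matrix f (goA matrix f (PySem.Set.add v (i, j)) (i + 1) j "U").2
            i (j + 1) "R").2 (i - 1) j "D").2 < f)]
        rw [loopB_none, hA]
        simp [String.append_assoc]
    · have hA : goA matrix (f + 1) v i j move = ("", v) := by
        rw [goA, if_pos (by tauto)]
      rw [hA, loopB_skip matrix v i j move stack out (Or.inl (by tauto)), String.append_empty]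

-- ===== VERDICT (by name: the statement is the Claim_ definition above) =====
theorem getIslandPattern_spec : Claim_equal_getIslandPattern := by
  intro matrix visited i j move _ _
  unfold Spec_getIslandPattern getIslandPattern getIslandPattern_alt
  have h : pvUnvisited matrix visited < (pvCells matrix).length + 1 :=
    Nat.lt_succ_of_le (List.length_filter_le _ _)
  rw [pv_bridge matrix ((pvCells matrix).length + 1) visited i j move [] "" h,
    loopB_nil, String.empty_append]
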